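-- pv_equiv track=rewrite | github.com/god9599/Algorithm.py | programmers/비밀지도.py | solution
-- ===== SOURCE A (Python) =====
-- def solution(n, arr1, arr2):
--     answer = []
--
--     dec1 = decrypt(n, arr1)
--     dec2 = decrypt(n, arr2)
--     for _dec1, _dec2 in zip(dec1, dec2):
--         result = ''
--         for j in range(n):
--             if _dec1[j] == 1 or _dec2[j] == 1:
--                 result += '#'
--             elif _dec1[j] == 0 and _dec2[j] == 0:
--                 result += ' '
--         answer.append(result)
--     return answer
--
-- def decrypt(n, arr):
--     decrypt_list = []
--     for i in arr:
--         li = []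
--         while True:
--             li.append(i % 2)
--             i = i // 2
--             if i == 0:
--                 if len(li) < n:
--                     for i in range(1, n - len(li) + 1):
--                         li.append(0)
--                 break
--         li.reverse()
--         decrypt_list.append(li)
--     return decrypt_list
-- ===== SOURCE B (Python) =====
-- def row(a, b, n):
--     # A's decode pads each number's binary form to width max(n, bit-length, 1);
--     # read the n leading bits of each directly by shift-and-mask.
--     la = max(n, a.bit_length(), 1)
--     lb = max(n, b.bit_length(), 1)
--     return ''.join(
--         '#' if (a >> (la - 1 - j)) & 1 or (b >> (lb - 1 - j)) & 1 else ' '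
--         for j in range(n))
--
--
-- def solution(n, arr1, arr2):
--     return [row(a, b, n) for a, b in zip(arr1, arr2)]
-- ===== Notes on version B (the rewrite author's own statement) =====
-- stated objective: simpler
-- what changed: B drops the decrypt helper entirely: instead of decoding each number into a bit list with a manual while-loop, padding and reversing it, and comparing the two lists position by position, B renders each of the n characters directly by shift-and-mask ((x >> (L-1-j)) & 1 with L = max(n, x.bit_length(), 1)) in a comprehension over zip(arr1, arr2).
import Mathlib
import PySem

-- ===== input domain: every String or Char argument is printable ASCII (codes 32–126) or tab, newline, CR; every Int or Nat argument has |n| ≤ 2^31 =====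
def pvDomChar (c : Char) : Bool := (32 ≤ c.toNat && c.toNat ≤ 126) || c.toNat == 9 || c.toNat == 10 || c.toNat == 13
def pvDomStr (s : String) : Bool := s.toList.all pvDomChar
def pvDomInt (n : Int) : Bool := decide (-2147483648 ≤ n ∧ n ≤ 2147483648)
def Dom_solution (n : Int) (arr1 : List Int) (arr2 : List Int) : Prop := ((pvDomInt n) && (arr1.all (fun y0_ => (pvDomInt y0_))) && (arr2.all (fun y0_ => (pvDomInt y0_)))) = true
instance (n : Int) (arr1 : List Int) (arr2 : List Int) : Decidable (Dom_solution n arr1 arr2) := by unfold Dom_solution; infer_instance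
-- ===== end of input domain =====

-- B drops A's decrypt helper (while-loop decode into padded, reversed bit lists) and renders
-- each character directly by shift-and-mask on the two integers (objective: simpler).

-- ===== PORT A =====
-- the `while True` decode loop of decrypt; fuel i.toNat+1 suffices for every i ≥ 0
-- (for i < 0 the Python loop never terminates; Pre_solution excludes those inputs)
def decBits (fuel : Nat) (i : Int) (li : List Int) : List Int :=
  match fuel with
  | 0 => li
  | fuel + 1 =>
    let li2 := li ++ [PySem.Int.mod i 2]
    let i2 := PySem.Int.floordiv i 2
    if i2 = 0 then li2 else decBits fuel i2 li2

def decrypt (n : Int) (arr : List Int) : List (List Int) :=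
  arr.foldl (fun decrypt_list i =>
    let li := decBits (i.toNat + 1) i []
    let li := if (li.length : Int) < n
              then (PySem.List.pyRange 1 (n - li.length + 1) 1).foldl (fun l _ => l ++ [(0:Int)]) li
              else li
    decrypt_list ++ [li.reverse]) []

def solution (n : Int) (arr1 : List Int) (arr2 : List Int) : List String :=
  let dec1 := decrypt n arr1
  let dec2 := decrypt n arr2
  (dec1.zip dec2).foldl (fun answer p =>
    let result := (PySem.List.pyRange 0 n 1).foldl (fun result j =>
      -- _dec[j]: always in range under Pre_solution, where pyGetD is exact
      if PySem.List.pyGetD p.1 j 0 = 1 ∨ PySem.List.pyGetD p.2 j 0 = 1 then result ++ "#"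
      else if PySem.List.pyGetD p.1 j 0 = 0 ∧ PySem.List.pyGetD p.2 j 0 = 0 then result ++ " "
      else result) ""
    answer ++ [result]) []

-- ===== PORT B =====
-- ''.join('#' if (a >> (la-1-j)) & 1 or (b >> (lb-1-j)) & 1 else ' ' for j in range(n));
-- la = max(n, a.bit_length(), 1) ≥ 1 + j for j in range(n), so the Nat-shift .toNat is exact
def rowB (a : Int) (b : Int) (n : Int) : String :=
  let la : Int := max (max n ((PySem.Int.bitLength a : Nat) : Int)) 1
  let lb : Int := max (max n ((PySem.Int.bitLength b : Nat) : Int)) 1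
  String.ofList ((PySem.List.pyRange 0 n 1).map (fun j =>
    if PySem.Int.band (a >>> (la - 1 - j).toNat) 1 ≠ 0 ∨ PySem.Int.band (b >>> (lb - 1 - j).toNat) 1 ≠ 0
    then '#' else ' '))

def solution_alt (n : Int) (arr1 : List Int) (arr2 : List Int) : List String :=
  (arr1.zip arr2).map (fun p => rowB p.1 p.2 n)

-- ===== PRECONDITION & SPEC =====
-- Pre_ excludes exactly the arrays with a negative entry: A's decrypt while-loop never
-- terminates there (i //= 2 stays at -1), so A returns on no such input.
def Pre_solution (n : Int) (arr1 : List Int) (arr2 : List Int) : Prop :=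
  (∀ a ∈ arr1, 0 ≤ a) ∧ (∀ b ∈ arr2, 0 ≤ b)
instance (n : Int) (arr1 : List Int) (arr2 : List Int) : Decidable (Pre_solution n arr1 arr2) := by
  unfold Pre_solution; infer_instance
def pvWitness_solution : Int × List Int × List Int := (5, [9, 20, 28, 18, 11], [30, 1, 21, 17, 28])

def Spec_solution (n : Int) (arr1 : List Int) (arr2 : List Int) (out : List String) : Prop := out = solution_alt n arr1 arr2
instance (n : Int) (arr1 : List Int) (arr2 : List Int) (out : List String) : Decidable (Spec_solution n arr1 arr2 out) := by unfold Spec_solution; infer_instance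

-- ===== CLAIM (what is proved, stated in full; the proofs are below) =====
def Claim_equal_solution : Prop := ∀ (n : Int) (arr1 : List Int) (arr2 : List Int), Dom_solution n arr1 arr2 → Pre_solution n arr1 arr2 → Spec_solution n arr1 arr2 (solution n arr1 arr2)

-- ===== LEMMAS AND PROOFS =====

-- LSB-first digit list that A's while-loop produces for a nonnegative value
def dig (m : Nat) : List Int :=
  if h : m / 2 = 0 then [((m % 2 : Nat) : Int)]
  else ((m % 2 : Nat) : Int) :: dig (m / 2)
termination_by m
decreasing_by exact Nat.div_lt_self (by omega) (by omega)

lemma dig_base {m : Nat} (h : m / 2 = 0) : dig m = [((m % 2 : Nat) : Int)] := by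
  rw [dig, dif_pos h]

lemma dig_cons {m : Nat} (h : ¬ m / 2 = 0) : dig m = ((m % 2 : Nat) : Int) :: dig (m / 2) := by
  rw [dig, dif_neg h]

lemma lt_two_pow_dig_length (m : Nat) : m < 2 ^ (dig m).length := by
  fun_induction dig m with
  | case1 m h => simp; omega
  | case2 m h ih =>
    simp only [List.length_cons, pow_succ]
    omega

lemma dig_length (m : Nat) : (dig m).length = max (PySem.Int.bitLength (m:Int)) 1 := by
  fun_induction dig m with
  | case1 m h =>
    have h01 : m = 0 ∨ m = 1 := by omega
    rcases h01 with rfl | rfl <;> decide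
  | case2 m h ih =>
    have hd : PySem.Int.floordiv (m:Int) 2 = ((m/2 : Nat) : Int) := by
      exact_mod_cast PySem.Int.floordiv_natCast m 2
    have hb := PySem.Int.bitLength_of_pos (show 0 < (m:Int) by omega)
    rw [hd] at hb
    rw [List.length_cons, ih, hb]
    have hlow := PySem.Int.lt_two_pow_bitLength ((m/2 : Nat) : Int)
    rw [Int.natAbs_natCast] at hlow
    have hb1 : 1 ≤ PySem.Int.bitLength ((m/2 : Nat) : Int) := by
      by_contra hc
      have h0 : PySem.Int.bitLength ((m/2 : Nat) : Int) = 0 := by omega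
      rw [h0] at hlow
      simp at hlow
      omega
    omega

lemma dig_getD (m i : Nat) : (dig m).getD i 0 = if m.testBit i then (1:Int) else 0 := by
  fun_induction dig m generalizing i with
  | case1 m h =>
    match i with
    | 0 =>
      simp only [List.getD_cons_zero, Nat.testBit_zero]
      rcases Nat.mod_two_eq_zero_or_one m with h2 | h2 <;> simp [h2]
    | i+1 => simp [Nat.testBit_add_one, h]
  | case2 m h ih =>
    match i with
    | 0 =>
      simp only [List.getD_cons_zero, Nat.testBit_zero]
      rcases Nat.mod_two_eq_zero_or_one m with h2 | h2 <;> simp [h2]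
    | i+1 => simp only [List.getD_cons_succ, Nat.testBit_add_one, ih]

lemma padded_getD (m q i : Nat) :
    (dig m ++ List.replicate q (0:Int)).getD i 0 = if m.testBit i then (1:Int) else 0 := by
  by_cases hi : i < (dig m).length
  · rw [List.getD_append _ _ _ _ hi, dig_getD]
  · have hbit : m.testBit i = false :=
      Nat.testBit_lt_two_pow (lt_of_lt_of_le (lt_two_pow_dig_length m) (Nat.pow_le_pow_right (by omega) (by omega)))
    rw [hbit]
    simp only [List.getD]
    by_cases h2 : i < (dig m).length + q
    · rw [List.getElem?_append_right (by omega)]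
      simp
    · rw [List.getElem?_eq_none (by simp; omega)]
      simp

lemma decBits_eq (fuel : Nat) : ∀ (m : Nat), m < fuel → ∀ li, decBits fuel (m : Int) li = li ++ dig m := by
  induction fuel with
  | zero => omega
  | succ fuel ih =>
    intro m hm li
    show (if (PySem.Int.floordiv (m:Int) 2 = 0) then li ++ [PySem.Int.mod (m:Int) 2]
          else decBits fuel (PySem.Int.floordiv (m:Int) 2) (li ++ [PySem.Int.mod (m:Int) 2])) = li ++ dig m
    have hd : PySem.Int.floordiv (m:Int) 2 = ((m/2 : Nat) : Int) := by
      exact_mod_cast PySem.Int.floordiv_natCast m 2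
    have hmod : PySem.Int.mod (m:Int) 2 = ((m%2 : Nat) : Int) := by
      exact_mod_cast PySem.Int.mod_natCast m 2
    rw [hd, hmod]
    by_cases h : m / 2 = 0
    · rw [dig_base h]; simp [h]
    · rw [dig_cons h, if_neg (by exact_mod_cast h)]
      rw [ih (m/2) (by have := Nat.div_lt_self (show 0 < m by omega) one_lt_two; omega)]
      simp

-- the padding for-loop appends (n - len) zeros
lemma pad_loop (k : Int) (li : List Int) :
    (PySem.List.pyRange 1 (k + 1) 1).foldl (fun l _ => l ++ [(0:Int)]) li
      = li ++ List.replicate k.toNat (0:Int) := by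
  have hlen : (PySem.List.pyRange 1 (k+1) 1).length = k.toNat := by
    rw [PySem.List.length_pyRange_one]; omega
  rw [← hlen]
  generalize PySem.List.pyRange 1 (k+1) 1 = r
  induction r generalizing li with
  | nil => simp
  | cons x xs ih => simp [ih, List.replicate_succ]

-- the value decrypt stores for a nonnegative entry
lemma decrypt_elem (n : Int) (m : Nat) :
    (let li := decBits (m + 1) (m:Int) []
     let li := if (li.length : Int) < n
               then (PySem.List.pyRange 1 (n - li.length + 1) 1).foldl (fun l _ => l ++ [(0:Int)]) li
               else li
     li.reverse)
    = (dig m ++ List.replicate (n - ((dig m).length:Int)).toNat (0:Int)).reverse := by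
  simp only [decBits_eq (m+1) m (by omega) [], List.nil_append]
  by_cases h : ((dig m).length : Int) < n
  · rw [if_pos h, pad_loop]
  · rw [if_neg h, show (n - ((dig m).length:Int)).toNat = 0 by omega]
    simp

-- the per-element value decrypt stores, in proof-friendly form
def EL (m : Nat) (n : Int) : List Int :=
  (dig m ++ List.replicate (n - ((dig m).length:Int)).toNat (0:Int)).reverse

-- the decrypted row, read at index j (MSB side), is bit (L-1-j) where L = max(len, n)
lemma E_getD (m : Nat) (n : Int) (j : Nat) (hj : j < n.toNat) :
    (EL m n).getD j 0
      = if m.testBit (max (dig m).length n.toNat - 1 - j) then (1:Int) else 0 := by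
  have hL : (dig m ++ List.replicate (n - ((dig m).length:Int)).toNat (0:Int)).length
      = max (dig m).length n.toNat := by
    simp; omega
  rw [EL]
  have hjL : j < (dig m ++ List.replicate (n - ((dig m).length:Int)).toNat (0:Int)).reverse.length := by
    rw [List.length_reverse, hL]; omega
  rw [List.getD_eq_getElem _ _ hjL, List.getElem_reverse]
  rw [← List.getD_eq_getElem _ _ (by omega)]
  rw [padded_getD]
  rw [hL]

-- B's shift-and-mask test is the bit test
lemma band_shift (m k : Nat) :
    (PySem.Int.band ((m:Int) >>> k) 1 ≠ 0) ↔ m.testBit k := by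
  have h1 : ((m:Int) >>> k) = ((m >>> k : Nat) : Int) := rfl
  rw [h1, show (1:Int) = ((1:Nat):Int) from rfl, PySem.Int.band_natCast]
  rw [Nat.and_one_is_mod, Nat.shiftRight_eq_div_pow, Nat.testBit_eq_decide_div_mod_eq]
  rcases Nat.mod_two_eq_zero_or_one (m / 2^k) with h | h <;> simp [h]

lemma foldl_push (c : Int → Char) (l : List Int) (s : List Char) :
    l.foldl (fun str j => str ++ String.ofList [c j]) (String.ofList s)
      = String.ofList (s ++ l.map c) := by
  induction l generalizing s with
  | nil => simp
  | cons x xs ih =>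
    simp only [List.foldl_cons]
    rw [← String.ofList_append, ih]
    simp

lemma row_eq (n a b : Int) (ha : 0 ≤ a) (hb : 0 ≤ b) :
    (PySem.List.pyRange 0 n 1).foldl (fun result j =>
      if PySem.List.pyGetD (EL a.toNat n) j 0 = 1 ∨ PySem.List.pyGetD (EL b.toNat n) j 0 = 1 then result ++ "#"
      else if PySem.List.pyGetD (EL a.toNat n) j 0 = 0 ∧ PySem.List.pyGetD (EL b.toNat n) j 0 = 0 then result ++ " "
      else result) ""
    = rowB a b n := by
  obtain ⟨ma, rfl⟩ := Int.eq_ofNat_of_zero_le ha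
  obtain ⟨mb, rfl⟩ := Int.eq_ofNat_of_zero_le hb
  simp only [Int.toNat_natCast]
  have hget : ∀ (m : Nat), ∀ j ∈ PySem.List.pyRange 0 n 1,
      PySem.List.pyGetD (EL m n) j 0
        = if m.testBit (max (dig m).length n.toNat - 1 - j.toNat) then (1:Int) else 0 := by
    intro m j hj
    rw [PySem.List.mem_pyRange_one] at hj
    rw [PySem.List.pyGetD_of_nonneg _ _ hj.1]
    exact E_getD m n j.toNat (by omega)
  rw [PySem.List.foldl_congr_mem _ _
      (fun result j => result ++ String.ofList
        [if (ma.testBit (max (dig ma).length n.toNat - 1 - j.toNat)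
             || mb.testBit (max (dig mb).length n.toNat - 1 - j.toNat)) then '#' else ' ']) ""
      (by
        intro acc j hj
        simp only [hget ma j hj, hget mb j hj]
        by_cases h1 : ma.testBit (max (dig ma).length n.toNat - 1 - j.toNat) <;>
          by_cases h2 : mb.testBit (max (dig mb).length n.toNat - 1 - j.toNat) <;> simp [h1, h2])]
  rw [show ("" : String) = String.ofList [] from rfl, foldl_push]
  rw [rowB]
  congr 1
  simp only [List.nil_append]
  apply List.map_congr_left
  intro j hj
  rw [PySem.List.mem_pyRange_one] at hj
  have hia : (max (max n ((PySem.Int.bitLength (ma:Int) : Nat) : Int)) 1 - 1 - j).toNat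
      = max (dig ma).length n.toNat - 1 - j.toNat := by
    rw [dig_length]; omega
  have hib : (max (max n ((PySem.Int.bitLength (mb:Int) : Nat) : Int)) 1 - 1 - j).toNat
      = max (dig mb).length n.toNat - 1 - j.toNat := by
    rw [dig_length]; omega
  simp only [hia, hib]
  have hba := band_shift ma (max (dig ma).length n.toNat - 1 - j.toNat)
  have hbb := band_shift mb (max (dig mb).length n.toNat - 1 - j.toNat)
  split_ifs with h1 h2 <;> simp_all

lemma dec_unfold (n : Int) (arr : List Int) (harr : ∀ a ∈ arr, 0 ≤ a) :
    decrypt n arr = arr.map (fun i => EL i.toNat n) := by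
  rw [decrypt, PySem.List.foldl_append_singleton_eq_map]
  simp only [List.nil_append]
  apply List.map_congr_left
  intro i hi
  have h0 := harr i hi
  have he := decrypt_elem n i.toNat
  rw [show ((i.toNat : Int)) = i from by omega] at he
  exact he

-- ===== VERDICT (by name: the statement is the Claim_ definition above) =====
theorem solution_spec : Claim_equal_solution := by
  intro n arr1 arr2 _hdom hpre
  obtain ⟨h1, h2⟩ := hpre
  show solution n arr1 arr2 = solution_alt n arr1 arr2
  rw [solution, solution_alt]
  rw [dec_unfold n arr1 h1, dec_unfold n arr2 h2, List.zip_map,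
      PySem.List.foldl_append_singleton_eq_map, List.nil_append, List.map_map]
  apply List.map_congr_left
  intro p hp
  obtain ⟨hp1, hp2⟩ := List.of_mem_zip (show (p.1, p.2) ∈ arr1.zip arr2 from by simpa using hp)
  have ha0 := h1 p.1 hp1
  have hb0 := h2 p.2 hp2
  simp only [Function.comp, Prod.map]
  exact row_eq n p.1 p.2 ha0 hb0
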